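-- pv_equiv track=rewrite | github.com/PSnik-Kostiantyn/SplitBrainDetector | app/model/DataPreparation.py | isClusterDead
-- ===== SOURCE A (Python) =====
-- def dfs(node, graph, visited, component):
--     visited[node] = True
--     component.append(node)
--     for neighbor, connected in enumerate(graph[node]):
--         if connected and graph[neighbor][node] and not visited[neighbor]:
--             dfs(neighbor, graph, visited, component)
--
-- def find_islands(matrix):
--     n = len(matrix)
--     visited = [False] * n
--     islands = []
--     for node in range(n):
--         if not visited[node]:
--             component = []
--             dfs(node, matrix, visited, component)
--             islands.append(component)
--     return islands
--
-- def isClusterDead(nodes, matrix):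
--     if all(all(cell == 0 for cell in row) for row in matrix):
--         return True
--     required_types = set(node[0].lower() for node in nodes)
--     islands = find_islands(matrix)
--     for island in islands:
--         types_in_island = set(nodes[node_index][0].lower() for node_index in island)
--         if required_types.issubset(types_in_island):
--             return False
--     return True
-- ===== SOURCE B (Python) =====
-- def isClusterDead(nodes, matrix):
--     if all(all(cell == 0 for cell in row) for row in matrix):
--         return True
--     n = len(matrix)
--     required_types = set(node[0].lower() for node in nodes)
--     for start in range(n):
--         comp = {start}
--         for _ in range(n):
--             comp = comp | {j for j in range(n)
--                            if j not in comp
--                            and any(matrix[k][j] and matrix[j][k] for k in comp)}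
--         if required_types.issubset(set(nodes[k][0].lower() for k in comp)):
--             return False
--     return True
-- ===== Notes on version B (the rewrite author's own statement) =====
-- stated objective: alternative
-- what changed: Replaces the recursive shared-visited DFS decomposition into islands by an independent per-start monotone fixpoint closure: for each node the connected component is grown by repeated frontier expansion over the symmetric edge relation, with no recursion, no shared visited array and no island list.
-- outside the precondition, e.g. on isClusterDead(['a', 'b'], [[1], [0, 1]]): A returns True, B raises IndexError; on isClusterDead(['a'], [[1, 0], [0, 1]]): A returns False, B returns False
import Mathlib
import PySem

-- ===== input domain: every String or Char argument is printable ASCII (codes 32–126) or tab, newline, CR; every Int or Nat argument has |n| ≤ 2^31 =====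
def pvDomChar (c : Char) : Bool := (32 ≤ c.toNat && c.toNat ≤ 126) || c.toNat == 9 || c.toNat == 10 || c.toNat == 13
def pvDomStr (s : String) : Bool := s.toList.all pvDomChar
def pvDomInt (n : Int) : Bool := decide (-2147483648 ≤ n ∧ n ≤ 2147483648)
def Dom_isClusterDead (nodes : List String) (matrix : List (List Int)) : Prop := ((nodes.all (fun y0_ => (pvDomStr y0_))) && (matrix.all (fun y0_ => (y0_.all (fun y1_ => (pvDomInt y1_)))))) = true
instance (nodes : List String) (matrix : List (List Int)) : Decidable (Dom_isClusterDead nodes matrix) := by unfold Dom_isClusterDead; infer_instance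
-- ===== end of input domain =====

-- B replaces A's recursive shared-visited DFS island decomposition by an independent
-- per-start fixpoint closure of the symmetric edge relation (alternative algorithm, not faster).


-- ===== PORT A =====
-- matrix[i][j] (total form; in range under Pre_)
def pvCell (g : List (List Int)) (i j : Int) : Int :=
  PySem.List.pyGetD (PySem.List.pyGetD g i []) j 0

-- visited[i]
def pvVmem (v : List Bool) (i : Int) : Bool := PySem.List.pyGetD v i false

-- node[0].lower()  (total form; node ≠ "" under Pre_)
def pvFirstLower (s : String) : Char :=
  PySem.Chars.lowerChar ((PySem.Str.pyGet? s 0).getD ' ')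

-- set(nodes[i][0].lower() for i in idxs)
def pvTypeSet (nodes : List String) (idxs : List Int) : PySem.Set Char :=
  PySem.Set.ofList (idxs.map (fun i => pvFirstLower (PySem.List.pyGetD nodes i "")))

mutual
-- def dfs(node, graph, visited, component), with a fuel guard that merely makes the
-- recursion total (never exhausted when called with fuel ≥ number of unvisited nodes)
def pvDfsVisit (g : List (List Int)) (fuel : Nat) (node : Int) (v : List Bool)
    (comp : List Int) : List Bool × List Int :=
  match fuel with
  | 0 => (v, comp)
  | f + 1 =>
      pvDfsLoop g f node (PySem.List.enumerate (PySem.List.pyGetD g node []))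
        (PySem.List.pySetD v node true) (comp ++ [node])
  termination_by (fuel, 0)

-- for neighbor, connected in enumerate(graph[node]): …
def pvDfsLoop (g : List (List Int)) (f : Nat) (node : Int) (l : List (Int × Int))
    (v : List Bool) (comp : List Int) : List Bool × List Int :=
  match l with
  | [] => (v, comp)
  | (nb, c) :: rest =>
      if c ≠ 0 ∧ pvCell g nb node ≠ 0 ∧ pvVmem v nb = false then
        let r := pvDfsVisit g f nb v comp
        pvDfsLoop g f node rest r.1 r.2
      else
        pvDfsLoop g f node rest v comp
  termination_by (f, l.length + 1)
end

-- one iteration of find_islands' "for node in range(n)" loop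
def pvIslStep (g : List (List Int)) (st : List Bool × List (List Int)) (node : Int) :
    List Bool × List (List Int) :=
  if pvVmem st.1 node = false then
    let r := pvDfsVisit g g.length node st.1 []
    (r.1, st.2 ++ [r.2])
  else st

-- def find_islands(matrix)
def pvFindIslands (g : List (List Int)) : List (List Int) :=
  ((PySem.List.pyRange 0 (g.length : Int) 1).foldl (pvIslStep g)
    (List.replicate g.length false, [])).2

def isClusterDead (nodes : List String) (matrix : List (List Int)) : Bool :=
  if matrix.all (fun row => row.all (fun cell => cell == 0)) then true
  else
    let required : PySem.Set Char := PySem.Set.ofList (nodes.map (fun node => pvFirstLower node))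
    let islands := pvFindIslands matrix
    !(islands.any (fun island => required.issubset (pvTypeSet nodes island)))

-- ===== PORT B =====
-- comp | {j for j in range(n) if j not in comp and any(matrix[k][j] and matrix[j][k] for k in comp)}
def pvStep (g : List (List Int)) (comp : PySem.Set Int) : PySem.Set Int :=
  PySem.Set.union comp
    (PySem.Set.ofList ((PySem.List.pyRange 0 (g.length : Int) 1).filter
      (fun j => !(PySem.Set.contains comp j) &&
        comp.any (fun k => pvCell g k j != 0 && pvCell g j k != 0))))

-- comp = {start}; for _ in range(n): comp = comp | {…}
def pvClosure (g : List (List Int)) (start : Int) : PySem.Set Int :=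
  (PySem.List.pyRange 0 (g.length : Int) 1).foldl (fun comp _ => pvStep g comp)
    (PySem.Set.ofList [start])

def isClusterDead_alt (nodes : List String) (matrix : List (List Int)) : Bool :=
  if matrix.all (fun row => row.all (fun cell => cell == 0)) then true
  else
    let required : PySem.Set Char := PySem.Set.ofList (nodes.map (fun node => pvFirstLower node))
    !((PySem.List.pyRange 0 (matrix.length : Int) 1).any
        (fun start => required.issubset (pvTypeSet nodes (pvClosure matrix start))))

-- ===== PRECONDITION & SPEC =====
-- Pre_ excludes inputs on which Python A raises IndexError: a non-square matrix, a matrix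
-- larger than the node list, or an empty node name (each with some non-zero cell); on a few
-- such malformed inputs A happens to return before hitting the bad index (see cites).
def Pre_isClusterDead (nodes : List String) (matrix : List (List Int)) : Prop :=
  (∀ row ∈ matrix, ∀ c ∈ row, c = 0) ∨
  ((∀ row ∈ matrix, row.length = matrix.length) ∧ matrix.length ≤ nodes.length ∧
    ∀ s ∈ nodes, s ≠ "")
instance (nodes : List String) (matrix : List (List Int)) : Decidable (Pre_isClusterDead nodes matrix) := by
  unfold Pre_isClusterDead; infer_instance

def pvWitness_isClusterDead : List String × List (List Int) := (["a", "b"], [[0, 1], [1, 0]])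

def Spec_isClusterDead (nodes : List String) (matrix : List (List Int)) (out : Bool) : Prop :=
  out = isClusterDead_alt nodes matrix
instance (nodes : List String) (matrix : List (List Int)) (out : Bool) : Decidable (Spec_isClusterDead nodes matrix out) := by
  unfold Spec_isClusterDead; infer_instance

-- ===== CLAIM (what is proved, stated in full; the proofs are below) =====
def Claim_equal_isClusterDead : Prop := ∀ (nodes : List String) (matrix : List (List Int)), Dom_isClusterDead nodes matrix → Pre_isClusterDead nodes matrix → Spec_isClusterDead nodes matrix (isClusterDead nodes matrix)

-- ===== LEMMAS AND PROOFS =====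

-- the symmetric edge relation both programs connect components with
def pvAdj (g : List (List Int)) (i j : Int) : Prop :=
  0 ≤ i ∧ i < (g.length : Int) ∧ 0 ≤ j ∧ j < (g.length : Int) ∧
    pvCell g i j ≠ 0 ∧ pvCell g j i ≠ 0

def pvReach (g : List (List Int)) : Int → Int → Prop := Relation.ReflTransGen (pvAdj g)

def pvSquare (g : List (List Int)) : Prop := ∀ row ∈ g, row.length = g.length

def pvUnvis (v : List Bool) : Nat := v.countP (fun b => !b)

theorem pvAdj_symm {g : List (List Int)} {i j : Int} (h : pvAdj g i j) : pvAdj g j i := by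
  obtain ⟨h1, h2, h3, h4, h5, h6⟩ := h; exact ⟨h3, h4, h1, h2, h6, h5⟩

theorem pvReach_symm {g : List (List Int)} {a b : Int} (h : pvReach g a b) : pvReach g b a := by
  induction h with
  | refl => exact Relation.ReflTransGen.refl
  | tail _ h2 ih => exact Relation.ReflTransGen.head (pvAdj_symm h2) ih

theorem pvReach_closed {g : List (List Int)} (P : Int → Prop)
    (hP : ∀ x y, P x → pvAdj g x y → P y) {s i : Int} (hs : P s) (h : pvReach g s i) : P i := by
  induction h with
  | refl => exact hs
  | tail _ h2 ih => exact hP _ _ ih h2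

theorem pvReach_nonneg {g : List (List Int)} {s i : Int} (h0 : 0 ≤ s) (h : pvReach g s i) :
    0 ≤ i := by
  induction h with
  | refl => exact h0
  | tail _ h2 _ => exact h2.2.2.1

theorem pvReach_congr {g : List (List Int)} {s t : Int} (h : pvReach g s t) (i : Int) :
    (pvReach g t i ↔ pvReach g s i) :=
  ⟨fun h2 => Relation.ReflTransGen.trans h h2,
   fun h2 => Relation.ReflTransGen.trans (pvReach_symm h) h2⟩

-- ---- small pyGetD facts ----
theorem pvGetD_ge {α : Type} (xs : List α) {i : Int} (d : α) (h : (xs.length : Int) ≤ i) :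
    PySem.List.pyGetD xs i d = d := by
  have h0 : 0 ≤ i := le_trans (by positivity) h
  simp only [PySem.List.pyGetD, PySem.List.pyGet?, PySem.List.pyIdx?, if_pos h0,
    if_neg (by omega : ¬ i < (xs.length : Int))]
  rfl

theorem pvVmem_eq_getElem {v : List Bool} {i : Int} (h0 : 0 ≤ i) (h1 : i < (v.length : Int)) :
    pvVmem v i = v[i.toNat]'(by omega) :=
  PySem.List.pyGetD_eq_getElem v false h0 h1

theorem pvVmem_set (v : List Bool) {node i : Int} (hn0 : 0 ≤ node) (hn : node < (v.length : Int))
    (hi : 0 ≤ i) :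
    pvVmem (PySem.List.pySetD v node true) i = if i = node then true else pvVmem v i := by
  unfold pvVmem
  rw [PySem.List.pySetD_of_nonneg _ _ hn0]
  by_cases hlt : i < (v.length : Int)
  · rw [PySem.List.pyGetD_eq_getElem _ false hi (by simp only [List.length_set]; omega),
      List.getElem_set]
    by_cases he : i = node
    · rw [if_pos (by omega), if_pos he]
    · rw [if_neg (by omega), if_neg he, PySem.List.pyGetD_eq_getElem v false hi hlt]
  · rw [pvGetD_ge _ false (by simp only [List.length_set]; omega),
      if_neg (by omega), pvGetD_ge v false (by omega)]

theorem pvVmem_replicate (n : Nat) (i : Int) : pvVmem (List.replicate n false) i = false := by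
  unfold pvVmem PySem.List.pyGetD
  cases h : PySem.List.pyGet? (List.replicate n false) i with
  | none => rfl
  | some a =>
    unfold PySem.List.pyGet? at h
    rcases Option.bind_eq_some_iff.mp h with ⟨k, -, hk2⟩
    have ha : a ∈ List.replicate n false := List.mem_of_getElem? hk2
    rw [List.eq_of_mem_replicate ha]
    rfl

-- ---- unvisited-count facts ----
theorem pvUnvis_le_length (v : List Bool) : pvUnvis v ≤ v.length := List.countP_le_length

theorem pvUnvis_pos {v : List Bool} {node : Int} (h0 : 0 ≤ node) (h1 : node < (v.length : Int))
    (hf : pvVmem v node = false) : 1 ≤ pvUnvis v := by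
  have hg := pvVmem_eq_getElem h0 h1 (v := v)
  rw [hf] at hg
  exact List.countP_pos_iff.mpr ⟨v[node.toNat]'(by omega), List.getElem_mem _, by rw [← hg]; rfl⟩

theorem pvCountP_mono : ∀ (v w : List Bool), w.length = v.length →
    (∀ k (_ : k < v.length) (_ : k < w.length), v[k] = true → w[k] = true) →
    w.countP (fun b => !b) ≤ v.countP (fun b => !b) := by
  intro v
  induction v with
  | nil => intro w hl _; rw [List.length_nil] at hl; rw [List.eq_nil_of_length_eq_zero hl]
  | cons a v ih =>
    intro w hl hmono
    cases w with
    | nil => simp at hl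
    | cons b w =>
      simp only [List.length_cons, Nat.add_right_cancel_iff] at hl
      have hhd : a = true → b = true := fun h => hmono 0 (by simp) (by simp) h
      have htl := ih w hl (fun k hk1 hk2 h => hmono (k+1) (by simpa using hk1) (by simpa using hk2) h)
      simp only [List.countP_cons]
      cases a <;> cases b <;> simp_all <;> omega

theorem pvUnvis_mono {v w : List Bool} (hl : w.length = v.length)
    (hmono : ∀ i : Int, 0 ≤ i → pvVmem v i = true → pvVmem w i = true) :
    pvUnvis w ≤ pvUnvis v := by
  apply pvCountP_mono v w hl
  intro k hk1 hk2 h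
  have h1 : pvVmem v (k : Int) = true := by
    rw [pvVmem_eq_getElem (by positivity) (by exact_mod_cast hk1)]
    simpa using h
  have h2 := hmono (k : Int) (by positivity) h1
  rw [pvVmem_eq_getElem (by positivity) (by exact_mod_cast hk2)] at h2
  simpa using h2

theorem pvCountP_set : ∀ (v : List Bool) (m : Nat) (_ : m < v.length), v[m] = false →
    (v.set m true).countP (fun b => !b) + 1 = v.countP (fun b => !b) := by
  intro v
  induction v with
  | nil => intro m hm; simp at hm
  | cons a v ih =>
    intro m hm hfalse
    cases m with
    | zero => simp_all
    | succ m =>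
      simp only [List.getElem_cons_succ] at hfalse
      have := ih m (by simpa using hm) hfalse
      simp only [List.set_cons_succ, List.countP_cons]
      omega

theorem pvUnvis_set {v : List Bool} {node : Int} (h0 : 0 ≤ node) (h1 : node < (v.length : Int))
    (hf : pvVmem v node = false) :
    pvUnvis (PySem.List.pySetD v node true) + 1 = pvUnvis v := by
  rw [PySem.List.pySetD_of_nonneg _ _ h0]
  apply pvCountP_set v node.toNat (by omega)
  rw [← pvVmem_eq_getElem h0 h1]
  exact hf

-- ---- enumerate characterization ----
theorem pvMem_enumerate_iff {α : Type} (xs : List α) (p : Int × α) (s : Int) :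
    p ∈ PySem.List.enumerate xs s ↔ ∃ k : Nat, p.1 = s + k ∧ xs[k]? = some p.2 := by
  induction xs generalizing s with
  | nil => simp [PySem.List.enumerate_nil]
  | cons x xs ih =>
    rw [PySem.List.enumerate_cons, List.mem_cons, ih (s + 1)]
    constructor
    · rintro (he | ⟨k, hk1, hk2⟩)
      · exact ⟨0, by rw [he]; simp, by rw [he]; simp⟩
      · exact ⟨k + 1, by push_cast; omega, by simpa using hk2⟩
    · rintro ⟨k, hk1, hk2⟩
      cases k with
      | zero =>
        left
        simp only [List.getElem?_cons_zero, Option.some_inj] at hk2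
        simp only [Nat.cast_zero, add_zero] at hk1
        exact Prod.ext hk1 hk2.symm
      | succ k =>
        right
        exact ⟨k, by push_cast at hk1 ⊢; omega, by simpa using hk2⟩

-- ---- DFS (port A) characterization ----
def pvVisitPost (g : List (List Int)) (node : Int) (v : List Bool) (comp : List Int)
    (r : List Bool × List Int) : Prop :=
  r.1.length = v.length ∧
  (∀ i : Int, 0 ≤ i → pvVmem v i = true → pvVmem r.1 i = true) ∧
  pvVmem r.1 node = true ∧
  (∀ i : Int, i ∈ r.2 ↔ i ∈ comp ∨ (0 ≤ i ∧ pvVmem r.1 i = true ∧ pvVmem v i = false)) ∧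
  (∀ i : Int, 0 ≤ i → pvVmem r.1 i = true → pvVmem v i = true ∨ pvReach g node i) ∧
  (∀ x y : Int, 0 ≤ x → pvVmem r.1 x = true → pvVmem v x = false → pvAdj g x y →
    pvVmem r.1 y = true)

def pvLoopPost (g : List (List Int)) (node : Int) (l : List (Int × Int)) (v : List Bool)
    (comp : List Int) (r : List Bool × List Int) : Prop :=
  r.1.length = v.length ∧
  (∀ i : Int, 0 ≤ i → pvVmem v i = true → pvVmem r.1 i = true) ∧
  (∀ i : Int, i ∈ r.2 ↔ i ∈ comp ∨ (0 ≤ i ∧ pvVmem r.1 i = true ∧ pvVmem v i = false)) ∧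
  (∀ i : Int, 0 ≤ i → pvVmem r.1 i = true → pvVmem v i = true ∨ pvReach g node i) ∧
  (∀ x y : Int, 0 ≤ x → pvVmem r.1 x = true → pvVmem v x = false → pvAdj g x y →
    pvVmem r.1 y = true) ∧
  (∀ p ∈ l, p.2 ≠ 0 → pvCell g p.1 node ≠ 0 → pvVmem r.1 p.1 = true)

theorem pvLoop_spec (g : List (List Int)) (f : Nat)
    (hIH : ∀ (node : Int) (v : List Bool) (comp : List Int), pvSquare g →
      v.length = g.length → 0 ≤ node → node < (g.length : Int) → pvVmem v node = false →
      pvUnvis v ≤ f → pvVisitPost g node v comp (pvDfsVisit g f node v comp)) :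
    ∀ (l : List (Int × Int)) (node : Int) (v : List Bool) (comp : List Int), pvSquare g →
      v.length = g.length → 0 ≤ node → node < (g.length : Int) → pvVmem v node = true →
      pvUnvis v ≤ f →
      (∀ p ∈ l, 0 ≤ p.1 ∧ p.1 < (g.length : Int) ∧ p.2 = pvCell g node p.1) →
      pvLoopPost g node l v comp (pvDfsLoop g f node l v comp) := by
  intro l
  induction l with
  | nil =>
    intro node v comp _ _ _ _ _ _ _
    simp only [pvDfsLoop]
    refine ⟨rfl, fun i _ h => h, ?_, fun i _ h => Or.inl h, ?_, by simp⟩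
    · intro i
      constructor
      · exact fun h => Or.inl h
      · rintro (h | ⟨_, h2, h3⟩)
        · exact h
        · rw [h2] at h3; cases h3
    · intro x y _ hx hnx _
      rw [hx] at hnx; cases hnx
  | cons hd rest ih =>
    obtain ⟨nb, c⟩ := hd
    intro node v comp hsq hlen hn0 hn1 hvn hu hl
    obtain ⟨hnb0, hnb1, hc⟩ := hl (nb, c) List.mem_cons_self
    simp only [pvDfsLoop]
    by_cases hcond : c ≠ 0 ∧ pvCell g nb node ≠ 0 ∧ pvVmem v nb = false
    · rw [if_pos hcond]
      obtain ⟨V1, V2, V3, V4, V5, V6⟩ := hIH nb v comp hsq hlen hnb0 hnb1 hcond.2.2 hu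
      have hadj : pvAdj g node nb :=
        ⟨hn0, hn1, hnb0, hnb1, by rw [← hc]; exact hcond.1, hcond.2.1⟩
      set r1 := pvDfsVisit g f nb v comp with hr1
      have hlen1 : r1.1.length = g.length := by rw [V1, hlen]
      have hvn1 : pvVmem r1.1 node = true := V2 node hn0 hvn
      have hu1 : pvUnvis r1.1 ≤ f := le_trans (pvUnvis_mono V1 V2) hu
      obtain ⟨L1, L2, L3, L4, L5, L6⟩ :=
        ih node r1.1 r1.2 hsq hlen1 hn0 hn1 hvn1 hu1
          (fun p hp => hl p (List.mem_cons_of_mem _ hp))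
      refine ⟨by rw [L1, V1], ?_, ?_, ?_, ?_, ?_⟩
      · exact fun i h0 h => L2 i h0 (V2 i h0 h)
      · intro i
        rw [L3 i, V4 i]
        constructor
        · rintro ((h | ⟨hi0, ha, hb⟩) | ⟨hi0, ha, hb⟩)
          · exact Or.inl h
          · exact Or.inr ⟨hi0, L2 i hi0 ha, hb⟩
          · refine Or.inr ⟨hi0, ha, ?_⟩
            cases hvv : pvVmem v i with
            | false => rfl
            | true => rw [V2 i hi0 hvv] at hb; cases hb
        · rintro (h | ⟨hi0, ha, hb⟩)
          · exact Or.inl (Or.inl h)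
          · by_cases h1 : pvVmem r1.1 i = true
            · exact Or.inl (Or.inr ⟨hi0, h1, hb⟩)
            · refine Or.inr ⟨hi0, ha, ?_⟩
              cases h' : pvVmem r1.1 i with
              | false => rfl
              | true => exact absurd h' h1
      · intro i hi0 hi
        rcases L4 i hi0 hi with h | h
        · rcases V5 i hi0 h with h' | h'
          · exact Or.inl h'
          · exact Or.inr (Relation.ReflTransGen.head hadj h')
        · exact Or.inr h
      · intro x y hx0 hx hnx hxy
        by_cases h1 : pvVmem r1.1 x = true
        · exact L2 y hxy.2.2.1 (V6 x y hx0 h1 hnx hxy)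
        · have hnx1 : pvVmem r1.1 x = false := by
            cases h' : pvVmem r1.1 x with
            | false => rfl
            | true => exact absurd h' h1
          exact L5 x y hx0 hx hnx1 hxy
      · intro p hp hp2 hp3
        rcases List.mem_cons.mp hp with he | hp'
        · subst he
          exact L2 nb hnb0 V3
        · exact L6 p hp' hp2 hp3
    · rw [if_neg hcond]
      obtain ⟨L1, L2, L3, L4, L5, L6⟩ :=
        ih node v comp hsq hlen hn0 hn1 hvn hu (fun p hp => hl p (List.mem_cons_of_mem _ hp))
      refine ⟨L1, L2, L3, L4, L5, ?_⟩
      intro p hp hp2 hp3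
      rcases List.mem_cons.mp hp with he | hp'
      · subst he
        simp only at hp2 hp3
        have hv : pvVmem v nb = true := by
          cases h' : pvVmem v nb with
          | true => rfl
          | false => exact absurd ⟨hp2, hp3, h'⟩ hcond
        exact L2 nb hnb0 hv
      · exact L6 p hp' hp2 hp3

theorem pvVisit_spec (g : List (List Int)) (f : Nat) :
    ∀ (node : Int) (v : List Bool) (comp : List Int), pvSquare g →
      v.length = g.length → 0 ≤ node → node < (g.length : Int) → pvVmem v node = false →
      pvUnvis v ≤ f → pvVisitPost g node v comp (pvDfsVisit g f node v comp) := by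
  induction f with
  | zero =>
    intro node v comp _ hlen hn0 hn1 hvf hu
    have := pvUnvis_pos hn0 (by rw [hlen]; exact hn1) hvf
    omega
  | succ f ihf =>
    intro node v comp hsq hlen hn0 hn1 hvf hu
    simp only [pvDfsVisit]
    set row := PySem.List.pyGetD g node [] with hrow
    have hrowmem : row ∈ g := PySem.List.pyGetD_mem g [] ⟨by omega, by omega⟩
    have hrowlen : row.length = g.length := hsq row hrowmem
    set v0 := PySem.List.pySetD v node true with hv0
    have hv0len : v0.length = v.length := PySem.List.length_pySetD v node true
    have hset : ∀ i : Int, 0 ≤ i →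
        pvVmem v0 i = if i = node then true else pvVmem v i :=
      fun i hi => pvVmem_set v hn0 (by rw [hlen]; exact hn1) hi
    have hv0n : pvVmem v0 node = true := by rw [hset node hn0]; simp
    have hu0 : pvUnvis v0 ≤ f := by
      have h := pvUnvis_set hn0 (by rw [hlen]; exact hn1) hvf
      rw [← hv0] at h
      omega
    have hl : ∀ p ∈ PySem.List.enumerate row, 0 ≤ p.1 ∧ p.1 < (g.length : Int) ∧
        p.2 = pvCell g node p.1 := by
      intro p hp
      rcases (pvMem_enumerate_iff row p 0).mp hp with ⟨k, hk1, hk2⟩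
      obtain ⟨hklt, hkval⟩ := List.getElem?_eq_some_iff.mp hk2
      have hkg : (k : Int) < (g.length : Int) := by
        have : k < g.length := by omega
        exact_mod_cast this
      refine ⟨by omega, by rw [hk1]; omega, ?_⟩
      have hcell : pvCell g node (k : Int) = row[k]'hklt := by
        show PySem.List.pyGetD (PySem.List.pyGetD g node []) (k : Int) 0 = row[k]'hklt
        rw [← hrow, PySem.List.pyGetD_eq_getElem row 0 (by positivity) (by exact_mod_cast hklt)]
        simp
      rw [hk1, zero_add, hcell, hkval]
    obtain ⟨L1, L2, L3, L4, L5, L6⟩ :=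
      pvLoop_spec g f ihf (PySem.List.enumerate row) node v0 (comp ++ [node]) hsq
        (by rw [hv0len, hlen]) hn0 hn1 hv0n hu0 hl
    set r := pvDfsLoop g f node (PySem.List.enumerate row) v0 (comp ++ [node]) with hr
    refine ⟨by rw [L1, hv0len], ?_, L2 node hn0 hv0n, ?_, ?_, ?_⟩
    · intro i hi0 h
      apply L2 i hi0
      rw [hset i hi0]
      by_cases he : i = node
      · rw [if_pos he]
      · rw [if_neg he]; exact h
    · intro i
      rw [L3 i]
      constructor
      · rintro (hc | ⟨hi0, ha, hb⟩)
        · rcases List.mem_append.mp hc with h | h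
          · exact Or.inl h
          · have he : i = node := by simpa using h
            subst he
            exact Or.inr ⟨hn0, L2 i hn0 hv0n, hvf⟩
        · rw [hset i hi0] at hb
          by_cases he : i = node
          · rw [if_pos he] at hb; cases hb
          · rw [if_neg he] at hb
            exact Or.inr ⟨hi0, ha, hb⟩
      · rintro (hc | ⟨hi0, ha, hb⟩)
        · exact Or.inl (List.mem_append.mpr (Or.inl hc))
        · by_cases he : i = node
          · exact Or.inl (List.mem_append.mpr (Or.inr (by simp [he])))
          · exact Or.inr ⟨hi0, ha, by rw [hset i hi0, if_neg he]; exact hb⟩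
    · intro i hi0 hi
      rcases L4 i hi0 hi with h | h
      · rw [hset i hi0] at h
        by_cases he : i = node
        · subst he; exact Or.inr Relation.ReflTransGen.refl
        · rw [if_neg he] at h; exact Or.inl h
      · exact Or.inr h
    · intro x y hx0 hx hnx hxy
      by_cases he : x = node
      · subst he
        obtain ⟨-, -, hy0, hy1, hcxy, hcyx⟩ := hxy
        have hky : y.toNat < row.length := by rw [hrowlen]; omega
        have hcellrow : pvCell g x y = row[y.toNat]'hky := by
          show PySem.List.pyGetD (PySem.List.pyGetD g x []) y 0 = row[y.toNat]'hky
          rw [← hrow, PySem.List.pyGetD_eq_getElem row 0 hy0 (by omega)]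
        have hpair : ((y, pvCell g x y) : Int × Int) ∈ PySem.List.enumerate row := by
          apply (pvMem_enumerate_iff row _ 0).mpr
          refine ⟨y.toNat, by simp [Int.toNat_of_nonneg hy0], ?_⟩
          rw [List.getElem?_eq_getElem hky, hcellrow]
        exact L6 (y, pvCell g x y) hpair hcxy hcyx
      · apply L5 x y hx0 hx _ hxy
        rw [hset x hx0, if_neg he]
        exact hnx

-- ---- find_islands invariant ----
def pvInv (g : List (List Int)) (st : List Bool × List (List Int)) (bound : Int) : Prop :=
  st.1.length = g.length ∧
  (∀ x y : Int, 0 ≤ x → pvVmem st.1 x = true → pvAdj g x y → pvVmem st.1 y = true) ∧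
  (∀ i : Int, 0 ≤ i → i < bound → pvVmem st.1 i = true) ∧
  (∀ island ∈ st.2, ∃ s : Int, 0 ≤ s ∧ s < (g.length : Int) ∧
    ∀ i : Int, i ∈ island ↔ pvReach g s i) ∧
  (∀ i : Int, 0 ≤ i → (pvVmem st.1 i = true ↔ ∃ island ∈ st.2, i ∈ island))

theorem pvIslStep_inv (g : List (List Int)) (hsq : pvSquare g)
    (st : List Bool × List (List Int)) (node : Int) (h0 : 0 ≤ node)
    (h1 : node < (g.length : Int)) (hInv : pvInv g st node) :
    pvInv g (pvIslStep g st node) (node + 1) := by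
  obtain ⟨I1, I2, I3, I4, I5⟩ := hInv
  unfold pvIslStep
  by_cases hvis : pvVmem st.1 node = false
  · rw [if_pos hvis]
    obtain ⟨V1, V2, V3, V4, V5, V6⟩ :=
      pvVisit_spec g g.length node st.1 [] hsq I1 h0 h1 hvis
        (by rw [← I1]; exact pvUnvis_le_length st.1)
    set r := pvDfsVisit g g.length node st.1 [] with hrdef
    have hC : ∀ x y : Int, 0 ≤ x → pvVmem r.1 x = true → pvAdj g x y →
        pvVmem r.1 y = true := by
      intro x y hx0 hx hxy
      by_cases hold : pvVmem st.1 x = true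
      · exact V2 y hxy.2.2.1 (I2 x y hx0 hold hxy)
      · refine V6 x y hx0 hx ?_ hxy
        cases h' : pvVmem st.1 x with
        | false => rfl
        | true => exact absurd h' hold
    have hδ : ∀ i : Int, i ∈ r.2 ↔ pvReach g node i := by
      intro i
      rw [V4 i]
      simp only [List.not_mem_nil, false_or]
      constructor
      · rintro ⟨hi0, ha, hb⟩
        rcases V5 i hi0 ha with h | h
        · rw [h] at hb; cases hb
        · exact h
      · intro hreach
        have hi0 : 0 ≤ i := pvReach_nonneg h0 hreach
        refine ⟨hi0, ?_, ?_⟩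
        · exact (pvReach_closed (fun z => 0 ≤ z ∧ pvVmem r.1 z = true)
            (fun x y hx hxy => ⟨hxy.2.2.1, hC x y hx.1 hx.2 hxy⟩) ⟨h0, V3⟩ hreach).2
        · cases h' : pvVmem st.1 i with
          | false => rfl
          | true =>
            exfalso
            have := pvReach_closed (fun z => 0 ≤ z ∧ pvVmem st.1 z = true)
              (fun x y hx hxy => ⟨hxy.2.2.1, I2 x y hx.1 hx.2 hxy⟩) ⟨hi0, h'⟩
              (pvReach_symm hreach)
            rw [this.2] at hvis
            cases hvis
    refine ⟨by rw [V1, I1], hC, ?_, ?_, ?_⟩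
    · intro i hi0 hilt
      by_cases he : i = node
      · subst he; exact V3
      · exact V2 i hi0 (I3 i hi0 (by omega))
    · intro island hisl
      rcases List.mem_append.mp hisl with h | h
      · exact I4 island h
      · have : island = r.2 := by simpa using h
        subst this
        exact ⟨node, h0, h1, hδ⟩
    · intro i hi0
      constructor
      · intro h
        rcases V5 i hi0 h with h' | h'
        · rcases (I5 i hi0).mp h' with ⟨isl, hisl, hin⟩
          exact ⟨isl, List.mem_append.mpr (Or.inl hisl), hin⟩
        · exact ⟨r.2, List.mem_append.mpr (Or.inr (by simp)), (hδ i).mpr h'⟩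
      · rintro ⟨isl, hisl, hin⟩
        rcases List.mem_append.mp hisl with h | h
        · exact V2 i hi0 ((I5 i hi0).mpr ⟨isl, h, hin⟩)
        · have : isl = r.2 := by simpa using h
          subst this
          rcases (V4 i).mp hin with hc | hc
          · exact absurd hc (List.not_mem_nil)
          · exact hc.2.1
  · rw [if_neg hvis]
    have hvn : pvVmem st.1 node = true := by
      cases h' : pvVmem st.1 node with
      | true => rfl
      | false => exact absurd h' hvis
    refine ⟨I1, I2, ?_, I4, I5⟩
    intro i hi0 hilt
    by_cases he : i = node
    · subst he; exact hvn
    · exact I3 i hi0 (by omega)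

theorem pvFold_inv (g : List (List Int)) (hsq : pvSquare g) :
    ∀ (m : Nat) (a : Int) (st : List Bool × List (List Int)), 0 ≤ a →
      a + m = (g.length : Int) → pvInv g st a →
      pvInv g ((PySem.List.pyRange a (g.length : Int) 1).foldl (pvIslStep g) st)
        (g.length : Int) := by
  intro m
  induction m with
  | zero =>
    intro a st ha0 ham hInv
    rw [PySem.List.pyRange_one_eq_nil (by omega)]
    simp only [List.foldl_nil]
    have : a = (g.length : Int) := by omega
    exact this ▸ hInv
  | succ m ihm =>
    intro a st ha0 ham hInv
    have halt : a < (g.length : Int) := by omega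
    rw [PySem.List.pyRange_one_cons halt, List.foldl_cons]
    exact ihm (a + 1) _ (by omega) (by omega) (pvIslStep_inv g hsq st a ha0 halt hInv)

-- ---- closure (port B) characterization ----
theorem pvStep_eq (g : List (List Int)) (comp : PySem.Set Int) :
    pvStep g comp = comp ++ ((PySem.List.pyRange 0 (g.length : Int) 1).filter
      (fun j => !(PySem.Set.contains comp j) &&
        comp.any (fun k => pvCell g k j != 0 && pvCell g j k != 0))) := by
  have hnd : ((PySem.List.pyRange 0 (g.length : Int) 1).filter
      (fun j => !(PySem.Set.contains comp j) &&
        comp.any (fun k => pvCell g k j != 0 && pvCell g j k != 0))).Nodup :=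
    (PySem.List.nodup_pyRange_one 0 (g.length : Int)).filter _
  show PySem.Set.update comp _ = _
  rw [PySem.Set.update_eq_append_filter, PySem.Set.ofList_ofList,
    PySem.Set.ofList_eq_self_of_nodup _ hnd]
  congr 1
  apply List.filter_eq_self.mpr
  intro a ha
  have hm := List.mem_filter.mp ha
  have hm2 := hm.2
  rw [Bool.and_eq_true] at hm2
  exact hm2.1

theorem pvStep_nodup (g : List (List Int)) (comp : PySem.Set Int) (h : comp.Nodup) :
    (pvStep g comp).Nodup := by
  rw [pvStep_eq]
  rw [List.nodup_append]
  refine ⟨h, (PySem.List.nodup_pyRange_one 0 (g.length : Int)).filter _, ?_⟩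
  intro a ha b hb hab
  subst hab
  have hm := List.mem_filter.mp hb
  have hm2 := hm.2
  rw [Bool.and_eq_true] at hm2
  have h1 := hm2.1
  rw [Bool.not_eq_true'] at h1
  rw [← PySem.Set.contains_iff comp a] at ha
  rw [ha] at h1
  cases h1

theorem pvStep_bounds (g : List (List Int)) (comp : PySem.Set Int)
    (h : ∀ i ∈ comp, 0 ≤ i ∧ i < (g.length : Int)) :
    ∀ i ∈ pvStep g comp, 0 ≤ i ∧ i < (g.length : Int) := by
  rw [pvStep_eq]
  intro i hi
  rcases List.mem_append.mp hi with hm | hm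
  · exact h i hm
  · exact PySem.List.mem_pyRange_one.mp (List.mem_filter.mp hm).1

theorem pvIterFix (g : List (List Int)) :
    ∀ (m : Nat) (comp : List Int), comp.Nodup → (∀ i ∈ comp, 0 ≤ i ∧ i < (g.length : Int)) →
      g.length ≤ comp.length + m →
      pvStep g ((pvStep g)^[m] comp) = (pvStep g)^[m] comp := by
  intro m
  induction m with
  | zero =>
    intro comp hnd hbd hlen
    rw [Function.iterate_zero_apply]
    rw [pvStep_eq]
    have hsub : ∀ j : Int, j ∈ PySem.List.pyRange 0 (g.length : Int) 1 → j ∈ comp := by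
      intro j hj
      have h1 : comp.toFinset ⊆ (PySem.List.pyRange 0 (g.length : Int) 1).toFinset := by
        intro x hx
        rw [List.mem_toFinset] at hx ⊢
        exact PySem.List.mem_pyRange_one.mpr ⟨(hbd x hx).1, (hbd x hx).2⟩
      have hcard1 : comp.toFinset.card = comp.length := List.toFinset_card_of_nodup hnd
      have hcard2 : (PySem.List.pyRange 0 (g.length : Int) 1).toFinset.card = g.length := by
        rw [List.toFinset_card_of_nodup (PySem.List.nodup_pyRange_one 0 (g.length : Int)),
          PySem.List.length_pyRange_one]
        omega
      have heq := Finset.eq_of_subset_of_card_le h1 (by omega)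
      have hj' : j ∈ (PySem.List.pyRange 0 (g.length : Int) 1).toFinset :=
        List.mem_toFinset.mpr hj
      rw [← heq] at hj'
      exact List.mem_toFinset.mp hj'
    have hfil : ((PySem.List.pyRange 0 (g.length : Int) 1).filter
        (fun j => !(PySem.Set.contains comp j) &&
          comp.any (fun k => pvCell g k j != 0 && pvCell g j k != 0))) = [] := by
      apply List.filter_eq_nil_iff.mpr
      intro a ha
      have hmem := hsub a ha
      have hcont : PySem.Set.contains comp a = true := (PySem.Set.contains_iff comp a).mpr hmem
      intro hEq
      rw [Bool.and_eq_true] at hEq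
      have h1 := hEq.1
      rw [Bool.not_eq_true'] at h1
      rw [hcont] at h1
      cases h1
    rw [hfil, List.append_nil]
  | succ m ihm =>
    intro comp hnd hbd hlen
    by_cases hfix : pvStep g comp = comp
    · rw [Function.iterate_fixed hfix]
      exact hfix
    · rw [Function.iterate_succ_apply]
      apply ihm (pvStep g comp) (pvStep_nodup g comp hnd) (pvStep_bounds g comp hbd)
      have hne : ((PySem.List.pyRange 0 (g.length : Int) 1).filter
          (fun j => !(PySem.Set.contains comp j) &&
            comp.any (fun k => pvCell g k j != 0 && pvCell g j k != 0))) ≠ [] := by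
        intro hnil
        apply hfix
        rw [pvStep_eq, hnil, List.append_nil]
      have hlen2 : comp.length + 1 ≤ (pvStep g comp).length := by
        rw [pvStep_eq, List.length_append]
        have := List.length_pos_iff.mpr hne
        omega
      omega

theorem pvClosure_mem (g : List (List Int)) (start : Int) (h0 : 0 ≤ start)
    (h1 : start < (g.length : Int)) :
    ∀ i : Int, i ∈ pvClosure g start ↔ pvReach g start i := by
  have hfoldit : ∀ (l : List Int) (c : List Int),
      l.foldl (fun c _ => pvStep g c) c = (pvStep g)^[l.length] c := by
    intro l
    induction l with
    | nil => intro c; rfl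
    | cons x xs ih =>
      intro c
      rw [List.foldl_cons, ih (pvStep g c), List.length_cons, Function.iterate_succ_apply]
  have hset1 : PySem.Set.ofList [start] = [start] :=
    PySem.Set.ofList_eq_self_of_nodup _ (by simp)
  have hclos : pvClosure g start = (pvStep g)^[g.length] [start] := by
    unfold pvClosure
    rw [hset1, hfoldit]
    congr 1
    rw [PySem.List.length_pyRange_one]
    omega
  have hpres : ∀ c : List Int,
      ((∀ i ∈ c, 0 ≤ i ∧ i < (g.length : Int) ∧ pvReach g start i) ∧ start ∈ c) →
      ((∀ i ∈ pvStep g c, 0 ≤ i ∧ i < (g.length : Int) ∧ pvReach g start i) ∧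
        start ∈ pvStep g c) := by
    rintro c ⟨hc, hstart⟩
    rw [pvStep_eq]
    constructor
    · intro i hi
      rcases List.mem_append.mp hi with h | h
      · exact hc i h
      · have hm := List.mem_filter.mp h
        have hb := PySem.List.mem_pyRange_one.mp hm.1
        have hm2 := hm.2
        rw [Bool.and_eq_true] at hm2
        obtain ⟨hcont, hany⟩ := hm2
        rcases List.any_eq_true.mp hany with ⟨k, hk, hkk⟩
        rw [Bool.and_eq_true] at hkk
        obtain ⟨hne1, hne2⟩ := hkk
        have hkc := hc k hk
        have hadj : pvAdj g k i :=
          ⟨hkc.1, hkc.2.1, hb.1, hb.2, by simpa using hne1, by simpa using hne2⟩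
        exact ⟨hb.1, hb.2, Relation.ReflTransGen.tail hkc.2.2 hadj⟩
    · exact List.mem_append.mpr (Or.inl hstart)
  have hinv : ∀ m : Nat,
      (∀ i ∈ (pvStep g)^[m] [start], 0 ≤ i ∧ i < (g.length : Int) ∧ pvReach g start i) ∧
      start ∈ (pvStep g)^[m] [start] := by
    intro m
    induction m with
    | zero =>
      refine ⟨?_, by simp⟩
      intro i hi
      have : i = start := by simpa using hi
      subst this
      exact ⟨h0, h1, Relation.ReflTransGen.refl⟩
    | succ m ih =>
      rw [Function.iterate_succ_apply']
      exact hpres _ ih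
  have hfix := pvIterFix g g.length [start] (by simp)
    (by
      intro i hi
      have : i = start := by simpa using hi
      subst this
      exact ⟨h0, h1⟩)
    (by simp)
  rw [← hclos] at hfix
  have hclosed : ∀ x y : Int, x ∈ pvClosure g start → pvAdj g x y → y ∈ pvClosure g start := by
    intro x y hx hxy
    by_contra hy
    have hyin : y ∈ pvStep g (pvClosure g start) := by
      rw [pvStep_eq]
      refine List.mem_append.mpr (Or.inr (List.mem_filter.mpr
        ⟨PySem.List.mem_pyRange_one.mpr ⟨hxy.2.2.1, hxy.2.2.2.1⟩, ?_⟩))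
      rw [Bool.and_eq_true]
      refine ⟨?_, ?_⟩
      · rw [Bool.not_eq_true']
        cases hcy : PySem.Set.contains (pvClosure g start) y with
        | false => rfl
        | true => exact absurd ((PySem.Set.contains_iff _ _).mp hcy) hy
      · refine List.any_eq_true.mpr ⟨x, hx, ?_⟩
        rw [Bool.and_eq_true]
        exact ⟨by simpa using hxy.2.2.2.2.1, by simpa using hxy.2.2.2.2.2⟩
    rw [hfix] at hyin
    exact hy hyin
  intro i
  constructor
  · intro hi
    rw [hclos] at hi
    exact ((hinv g.length).1 i hi).2.2
  · intro hr
    refine pvReach_closed (fun z => z ∈ pvClosure g start) hclosed ?_ hr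
    rw [hclos]
    exact (hinv g.length).2

-- ---- type-set congruence ----
theorem pvTypeSet_congr (nodes : List String) (X Y : List Int)
    (h : ∀ i : Int, i ∈ X ↔ i ∈ Y) (req : PySem.Set Char) :
    req.issubset (pvTypeSet nodes X) = req.issubset (pvTypeSet nodes Y) := by
  rw [Bool.eq_iff_iff, PySem.Set.issubset_iff, PySem.Set.issubset_iff]
  have hmem : ∀ x : Char, x ∈ pvTypeSet nodes X ↔ x ∈ pvTypeSet nodes Y := by
    intro x
    unfold pvTypeSet
    rw [PySem.Set.mem_ofList, PySem.Set.mem_ofList, List.mem_map, List.mem_map]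
    constructor
    · rintro ⟨i, hi, hx⟩; exact ⟨i, (h i).mp hi, hx⟩
    · rintro ⟨i, hi, hx⟩; exact ⟨i, (h i).mpr hi, hx⟩
  constructor
  · intro hall x hx
    exact (hmem x).mp (hall x hx)
  · intro hall x hx
    exact (hmem x).mpr (hall x hx)

-- ===== VERDICT (by name: the statement is the Claim_ definition above) =====
theorem isClusterDead_spec : Claim_equal_isClusterDead := by
  intro nodes matrix _ hPre
  unfold Spec_isClusterDead
  by_cases hz : matrix.all (fun row => row.all (fun cell => cell == 0)) = true
  · simp only [isClusterDead, isClusterDead_alt, if_pos hz]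
  · simp only [isClusterDead, isClusterDead_alt, if_neg hz]
    have hsq : pvSquare matrix := by
      rcases hPre with hall | h
      · exfalso
        apply hz
        rw [List.all_eq_true]
        intro row hr
        rw [List.all_eq_true]
        intro c hc
        simpa using hall row hr c hc
      · exact h.1
    have hInv0 : pvInv matrix (List.replicate matrix.length false, []) 0 := by
      refine ⟨by simp, ?_, by intro i h1 h2; omega, by simp, ?_⟩
      · intro x y _ hx _
        rw [pvVmem_replicate] at hx
        cases hx
      · intro i _
        simp [pvVmem_replicate]
    obtain ⟨F1, F2, F3, F4, F5⟩ :=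
      pvFold_inv matrix hsq matrix.length 0 (List.replicate matrix.length false, [])
        le_rfl (by omega) hInv0
    unfold pvFindIslands
    congr 1
    rw [Bool.eq_iff_iff, List.any_eq_true, List.any_eq_true]
    constructor
    · rintro ⟨island, hisl, hsub⟩
      rcases F4 island hisl with ⟨s, hs0, hs1, hchar⟩
      refine ⟨s, PySem.List.mem_pyRange_one.mpr ⟨hs0, hs1⟩, ?_⟩
      rw [← pvTypeSet_congr nodes island (pvClosure matrix s)
        (fun i => by rw [hchar i, pvClosure_mem matrix s hs0 hs1 i])]
      exact hsub
    · rintro ⟨start, hmem, hsub⟩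
      have hb := PySem.List.mem_pyRange_one.mp hmem
      have hvstart := F3 start hb.1 hb.2
      rcases (F5 start hb.1).mp hvstart with ⟨island, hisl, hin⟩
      rcases F4 island hisl with ⟨s, hs0, hs1, hchar⟩
      refine ⟨island, hisl, ?_⟩
      have hrs : pvReach matrix s start := (hchar start).mp hin
      have hiff : ∀ i : Int, i ∈ pvClosure matrix start ↔ i ∈ island := by
        intro i
        rw [pvClosure_mem matrix start hb.1 hb.2 i, hchar i]
        exact pvReach_congr hrs i
      rw [pvTypeSet_congr nodes island (pvClosure matrix start) (fun i => (hiff i).symm)]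
      exact hsub
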